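-- pv_equiv track=rewrite | github.com/supportersimulator/contextdna-ide | scripts/discord-split.py | _fence_state_at
-- ===== SOURCE A (Python) =====
-- from typing import List, Tuple
--
-- def _fence_state_at(text: str) -> Tuple[bool, str]:
--     """Return (inside_fence, lang) after processing `text`.
--
--     Scans lines for ```-opened fences; each bare ``` toggles off.
--     """
--     inside = False
--     lang = ""
--     for line in text.splitlines():
--         stripped = line.strip()
--         if stripped.startswith("```"):
--             if inside:
--                 inside = False
--                 lang = ""
--             else:
--                 inside = True
--                 lang = stripped[3:].strip()
--     return inside, lang
-- ===== SOURCE B (Python) =====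
-- def _fence_state_at(text: str):
--     """Collect fence markers, then reduce: inside = odd count, lang = last marker."""
--     fences = [s[3:].strip()
--               for line in text.splitlines()
--               if (s := line.strip()).startswith("```")]
--     inside = len(fences) % 2 == 1
--     return inside, (fences[-1] if inside else "")
-- ===== Notes on version B (the rewrite author's own statement) =====
-- stated objective: simpler
-- what changed: Replaces the state-toggling loop with a collect-then-reduce: build the list of fence markers by a filtering comprehension, get inside from the parity of its length, and lang as the last marker when inside.
import Mathlib
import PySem

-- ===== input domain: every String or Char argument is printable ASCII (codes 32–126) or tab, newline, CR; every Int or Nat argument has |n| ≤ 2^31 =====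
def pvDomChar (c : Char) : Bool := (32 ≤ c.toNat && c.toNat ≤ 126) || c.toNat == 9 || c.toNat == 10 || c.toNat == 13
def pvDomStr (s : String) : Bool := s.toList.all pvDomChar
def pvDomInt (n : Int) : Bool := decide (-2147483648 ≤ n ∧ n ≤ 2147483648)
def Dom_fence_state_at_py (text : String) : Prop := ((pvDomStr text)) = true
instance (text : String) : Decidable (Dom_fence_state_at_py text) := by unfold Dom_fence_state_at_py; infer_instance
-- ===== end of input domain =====

-- B replaces A's state-toggling loop with collect-then-reduce (filter markers, parity, last); simpler decomposition, same cost.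

-- ===== PORT A =====
-- literal port of A: fold the (inside, lang) state over the lines, toggling on each ``` line
def fence_state_at_py (text : String) : Bool × String :=
  (PySem.Str.splitlines text).foldl
    (fun st line =>
      let stripped := PySem.Str.strip line
      if PySem.Str.startswith stripped "```" then
        if st.1 then (false, "")
        else (true, PySem.Str.strip (PySem.Str.slice stripped (some 3) none))
      else st)
    (false, "")

-- ===== PORT B =====
-- the marker a line contributes, if any: stripped line starts with ``` → its stripped tail after "```"
def pvMarker? (line : String) : Option String :=
  let s := PySem.Str.strip line
  if PySem.Str.startswith s "```" then
    some (PySem.Str.strip (PySem.Str.slice s (some 3) none))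
  else none

def fence_state_at_py_alt (text : String) : Bool × String :=
  let fences := (PySem.Str.splitlines text).filterMap pvMarker?
  let inside := fences.length % 2 == 1
  -- fences[-1]: only evaluated when inside, hence fences ≠ []; getLastD is exact there
  (inside, if inside then fences.getLastD "" else "")

-- ===== PRECONDITION & SPEC =====
def Spec_fence_state_at_py (text : String) (out : Bool × String) : Prop := out = fence_state_at_py_alt text
instance (text : String) (out : Bool × String) : Decidable (Spec_fence_state_at_py text out) := by unfold Spec_fence_state_at_py; infer_instance

-- ===== CLAIM (what is proved, stated in full; the proofs are below) =====
def Claim_equal_fence_state_at_py : Prop := ∀ (text : String), Dom_fence_state_at_py text → Spec_fence_state_at_py text (fence_state_at_py text)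

-- ===== LEMMAS AND PROOFS =====

-- the toggle step of A, expressed on markers
def pvTog (st : Bool × String) (m : String) : Bool × String :=
  if st.1 then (false, "") else (true, m)

-- A's per-line step is pvTog applied to the line's marker (if any)
lemma pvStep_eq (st : Bool × String) (line : String) :
    (let stripped := PySem.Str.strip line
     if PySem.Str.startswith stripped "```" then
       if st.1 then (false, "")
       else (true, PySem.Str.strip (PySem.Str.slice stripped (some 3) none))
     else st)
    = match pvMarker? line with
      | some m => pvTog st m
      | none => st := by
  simp only [pvMarker?, pvTog]
  split_ifs <;> simp

-- folding A's step over lines = folding pvTog over the filtered markers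
lemma pvFold_eq (ls : List String) : ∀ (st : Bool × String),
    ls.foldl
      (fun st line =>
        let stripped := PySem.Str.strip line
        if PySem.Str.startswith stripped "```" then
          if st.1 then (false, "")
          else (true, PySem.Str.strip (PySem.Str.slice stripped (some 3) none))
        else st)
      st
    = (ls.filterMap pvMarker?).foldl pvTog st := by
  induction ls with
  | nil => intro st; rfl
  | cons l t ih =>
    intro st
    simp only [List.foldl_cons, List.filterMap_cons]
    rw [pvStep_eq st l]
    cases h : pvMarker? l <;> exact ih _

-- the toggle fold from (false, "") is parity + last marker
lemma pvTog_parity (fs : List String) :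
    fs.foldl pvTog (false, "") =
      ((fs.length % 2 == 1), if fs.length % 2 == 1 then fs.getLastD "" else "") := by
  induction fs using List.reverseRecOn with
  | nil => rfl
  | append_singleton t m ih =>
    rw [List.foldl_append, ih]
    simp only [List.foldl_cons, List.foldl_nil, pvTog, List.length_append]
    rcases Nat.even_or_odd t.length with h | h
    · have h2 : t.length % 2 = 0 := Nat.even_iff.mp h
      simp [h2, Nat.add_mod]
    · have h2 : t.length % 2 = 1 := Nat.odd_iff.mp h
      simp [h2, Nat.add_mod]

-- ===== VERDICT (by name: the statement is the Claim_ definition above) =====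
theorem fence_state_at_py_spec : Claim_equal_fence_state_at_py := by
  intro text _
  unfold Spec_fence_state_at_py fence_state_at_py fence_state_at_py_alt
  rw [pvFold_eq, pvTog_parity]
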